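-- pv_equiv track=rewrite | github.com/pypi-data/pypi-mirror-298 | packages/ngc/ngc-0.21.tar.gz/ngc-0.21/ngc/__init__.py | insert_blank_lines
-- ===== SOURCE A (Python) =====
-- def insert_blank_lines(lisa, lisb):
--     # 给我markdown格式的python3函数，
--     # 输入字符串列表lisa和lisb，lisa中有空行，lisb没有空行，
--     # 请在lisb中的lisa所有有空行的位置插入空行，输出lisb
--     blank_indexes = []
--     for index, line in enumerate(lisa):
--         if line == '':
--             blank_indexes.append(index)
--     for blank_index in blank_indexes:
--         lisb.insert(blank_index, '')
--     return lisb
-- ===== SOURCE B (Python) =====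
-- def insert_blank_lines(lisa, lisb):
--     # Single-pass merge: one element of lisb per non-blank line of lisa,
--     # '' per blank line, then any leftover of lisb; replaces repeated list.insert.
--     out = []
--     j = 0
--     for line in lisa:
--         if line == '':
--             out.append('')
--         elif j < len(lisb):
--             out.append(lisb[j])
--             j += 1
--     out.extend(lisb[j:])
--     lisb[:] = out
--     return lisb
-- ===== Notes on version B (the rewrite author's own statement) =====
-- stated objective: alternative
-- what changed: Replaced the loop of repeated list.insert calls into lisb (each shifting the tail) with a single merge pass that emits '' for each blank line of lisa and the next lisb element for each non-blank line, then appends the leftover of lisb.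
import Mathlib
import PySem

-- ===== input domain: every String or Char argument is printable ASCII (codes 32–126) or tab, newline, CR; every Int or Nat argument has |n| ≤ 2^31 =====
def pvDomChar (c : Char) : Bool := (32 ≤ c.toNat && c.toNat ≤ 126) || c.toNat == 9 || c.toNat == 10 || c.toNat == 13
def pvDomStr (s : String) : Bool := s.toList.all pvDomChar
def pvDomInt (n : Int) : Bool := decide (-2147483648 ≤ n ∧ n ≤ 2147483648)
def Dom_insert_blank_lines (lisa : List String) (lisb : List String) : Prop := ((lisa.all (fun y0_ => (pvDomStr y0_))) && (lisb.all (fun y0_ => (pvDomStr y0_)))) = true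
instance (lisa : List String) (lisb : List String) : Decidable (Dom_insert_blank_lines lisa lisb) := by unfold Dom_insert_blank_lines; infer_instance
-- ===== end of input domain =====

-- ===== PORT A =====
-- B replaces A's repeated list.insert with a single merge pass; A mutates lisb in
-- place (B performs the same mutation in Python); the equivalence proved is about the return value.
def insert_blank_lines (lisa : List String) (lisb : List String) : List String :=
  let blank_indexes : List Int :=
    (PySem.List.enumerate lisa).foldl
      (fun acc p => if p.2 = "" then acc ++ [p.1] else acc) []
  blank_indexes.foldl (fun l b => PySem.List.insert l b "") lisb

-- ===== PORT B =====
def insert_blank_lines_alt (lisa : List String) (lisb : List String) : List String :=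
  let s := lisa.foldl
    (fun (s : List String × Int) line =>
      if line = "" then (s.1 ++ [""], s.2)
      else if s.2 < (lisb.length : Int) then (s.1 ++ [PySem.List.pyGetD lisb s.2 ""], s.2 + 1)
      else s)
    ([], 0)
  s.1 ++ PySem.List.slice lisb (some s.2) none

-- ===== PRECONDITION & SPEC =====
def Spec_insert_blank_lines (lisa : List String) (lisb : List String) (out : List String) : Prop := out = insert_blank_lines_alt lisa lisb
instance (lisa : List String) (lisb : List String) (out : List String) : Decidable (Spec_insert_blank_lines lisa lisb out) := by unfold Spec_insert_blank_lines; infer_instance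

-- ===== CLAIM (what is proved, stated in full; the proofs are below) =====
def Claim_equal_insert_blank_lines : Prop := ∀ (lisa : List String) (lisb : List String), Dom_insert_blank_lines lisa lisb → Spec_insert_blank_lines lisa lisb (insert_blank_lines lisa lisb)

-- ===== LEMMAS AND PROOFS =====

-- Canonical merge both ports are reduced to: one '' per blank line of lisa, one
-- element of r per non-blank line (skipped once r is exhausted), then the rest of r.
def pvMerge : List String → List String → List String
  | [], r => r
  | l :: rest, r =>
    if l = "" then "" :: pvMerge rest r
    else
      match r with
      | [] => pvMerge rest []
      | a :: r' => a :: pvMerge rest r'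

-- The blank indices of lisa counted from offset s (what A's first loop collects).
def pvBlk : List String → Int → List Int
  | [], _ => []
  | l :: rest, s => (if l = "" then [s] else []) ++ pvBlk rest (s + 1)

theorem pvBlanks_eq (lisa : List String) : ∀ (s : Int) (acc : List Int),
    (PySem.List.enumerate lisa s).foldl
      (fun acc p => if p.2 = "" then acc ++ [p.1] else acc) acc = acc ++ pvBlk lisa s := by
  induction lisa with
  | nil => intro s acc; simp [PySem.List.enumerate_nil, pvBlk]
  | cons l rest ih =>
    intro s acc
    rw [PySem.List.enumerate_cons, List.foldl_cons, ih]
    by_cases h : l = "" <;> simp [pvBlk, h]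

theorem pvBlk_shift (lisa : List String) : ∀ s : Int, pvBlk lisa (s + 1) = (pvBlk lisa s).map (· + 1) := by
  induction lisa with
  | nil => intro s; simp [pvBlk]
  | cons l rest ih =>
    intro s
    by_cases h : l = "" <;> simp [pvBlk, h, ih]

theorem pvBlk_nonneg (lisa : List String) : ∀ (s b : Int), b ∈ pvBlk lisa s → s ≤ b := by
  induction lisa with
  | nil => intro s b hb; simp [pvBlk] at hb
  | cons l rest ih =>
    intro s b hb
    by_cases h : l = "" <;> simp [pvBlk, h] at hb
    · rcases hb with hb | hb
      · omega
      · have := ih (s + 1) b hb; omega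
    · have := ih (s + 1) b hb; omega

-- Python list.insert with a nonnegative index clamps to the length: take/drop form.
theorem pvIns_nonneg {α : Type} (xs : List α) (b : Int) (v : α) (hb : 0 ≤ b) :
    PySem.List.insert xs b v = xs.take b.toNat ++ v :: xs.drop b.toNat := by
  simp only [PySem.List.insert, PySem.List.sliceIndices]
  have h1 : ¬ ((1:Int) < 0) := by omega
  have h2 : ¬ (b < 0) := by omega
  simp only [if_neg h1, if_neg h2]
  have h3 : (min b (xs.length:Int)).toNat = min b.toNat xs.length := by omega
  rw [h3]
  by_cases h : b.toNat ≤ xs.length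
  · rw [min_eq_left h]
  · have ht : xs.take b.toNat = xs := List.take_of_length_le (Nat.le_of_lt (Nat.lt_of_not_le h))
    have hm : min b.toNat xs.length = xs.length := by omega
    rw [hm, List.take_length, ht]
    simp
    omega

theorem pvIns_cons_succ {α : Type} (a : α) (l : List α) (b : Int) (v : α) (hb : 0 ≤ b) :
    PySem.List.insert (a :: l) (b + 1) v = a :: PySem.List.insert l b v := by
  rw [pvIns_nonneg _ _ _ (by omega), pvIns_nonneg _ _ _ hb]
  have h1 : (b + 1).toNat = b.toNat + 1 := by omega
  rw [h1]
  simp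

theorem pvFoldIns_shift (bs : List Int) : ∀ (a : String) (l : List String), (∀ b ∈ bs, 0 ≤ b) →
    (bs.map (· + 1)).foldl (fun l b => PySem.List.insert l b "") (a :: l)
      = a :: bs.foldl (fun l b => PySem.List.insert l b "") l := by
  induction bs with
  | nil => intro a l _; simp
  | cons b bs ih =>
    intro a l hnn
    simp only [List.map_cons, List.foldl_cons]
    rw [pvIns_cons_succ _ _ _ _ (hnn b (by simp)), ih _ _ (fun x hx => hnn x (by simp [hx]))]

theorem pvFoldIns_all_blank (bs : List Int) : ∀ l : List String, (∀ b ∈ bs, 0 ≤ b) → (∀ x ∈ l, x = "") →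
    bs.foldl (fun l b => PySem.List.insert l b "") l = List.replicate (l.length + bs.length) "" := by
  induction bs with
  | nil => intro l _ hl; simpa using List.eq_replicate_of_mem hl
  | cons b bs ih =>
    intro l hnn hl
    simp only [List.foldl_cons]
    rw [pvIns_nonneg _ _ _ (hnn b (by simp))]
    rw [ih _ (fun x hx => hnn x (by simp [hx]))]
    · have hlen : (l.take b.toNat ++ "" :: l.drop b.toNat).length = l.length + 1 := by
        simp only [List.length_append, List.length_take, List.length_cons, List.length_drop]
        omega
      rw [hlen]
      simp only [List.length_cons]
      congr 1
      omega
    · intro x hx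
      simp only [List.mem_append, List.mem_cons] at hx
      rcases hx with hx | hx | hx
      · exact hl x (List.mem_of_mem_take hx)
      · exact hx
      · exact hl x (List.mem_of_mem_drop hx)

theorem pvMerge_nil_right (lisa : List String) : pvMerge lisa [] = List.replicate (pvBlk lisa 0).length "" := by
  induction lisa with
  | nil => simp [pvMerge, pvBlk]
  | cons l rest ih =>
    have hsh : pvBlk rest 1 = (pvBlk rest 0).map (· + 1) := by
      simpa using pvBlk_shift rest 0
    by_cases h : l = ""
    · simp [pvMerge, h, ih, pvBlk, hsh, List.replicate_succ]
    · simp [pvMerge, h, ih, pvBlk, hsh]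

-- A-side: the fold of inserts over the blank indices is the canonical merge.
theorem pvA_eq_merge (lisa : List String) : ∀ lisb : List String,
    (pvBlk lisa 0).foldl (fun l b => PySem.List.insert l b "") lisb = pvMerge lisa lisb := by
  induction lisa with
  | nil => intro lisb; simp [pvBlk, pvMerge]
  | cons l rest ih =>
    intro lisb
    have hsh := pvBlk_shift rest 0
    have hnn : ∀ b ∈ pvBlk rest 0, 0 ≤ b := fun b hb => pvBlk_nonneg rest 0 b hb
    by_cases h : l = ""
    · simp only [pvBlk, if_pos h, List.singleton_append, List.foldl_cons]
      rw [hsh, pvIns_nonneg _ _ _ (by omega)]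
      simp only [Int.toNat_zero, List.take_zero, List.drop_zero, List.nil_append]
      rw [pvFoldIns_shift _ _ _ hnn, ih]
      simp [pvMerge, h]
    · simp only [pvBlk, if_neg h, List.nil_append]
      rw [hsh]
      match lisb with
      | [] =>
        rw [pvFoldIns_all_blank _ _ (by
          intro b hb
          simp only [List.mem_map] at hb
          obtain ⟨c, hc, rfl⟩ := hb
          have := hnn c hc; omega) (by simp)]
        simp only [List.length_nil, Nat.zero_add, List.length_map]
        simp only [pvMerge, if_neg h]
        exact (pvMerge_nil_right rest).symm
      | a :: l' =>
        rw [pvFoldIns_shift _ _ _ hnn, ih]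
        simp [pvMerge, h]

-- B-side: the single-pass fold with its (built, consumed) state is the canonical merge.
theorem pvB_eq_merge (lisb : List String) (lisa : List String) : ∀ (out : List String) (jn : Nat),
    (lisa.foldl
      (fun (s : List String × Int) line =>
        if line = "" then (s.1 ++ [""], s.2)
        else if s.2 < (lisb.length : Int) then (s.1 ++ [PySem.List.pyGetD lisb s.2 ""], s.2 + 1)
        else s)
      (out, (jn : Int))).1
      ++ PySem.List.slice lisb (some ((lisa.foldl
      (fun (s : List String × Int) line =>
        if line = "" then (s.1 ++ [""], s.2)
        else if s.2 < (lisb.length : Int) then (s.1 ++ [PySem.List.pyGetD lisb s.2 ""], s.2 + 1)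
        else s)
      (out, (jn : Int))).2)) none
    = out ++ pvMerge lisa (lisb.drop jn) := by
  induction lisa with
  | nil =>
    intro out jn
    simp only [List.foldl_nil]
    rw [PySem.List.slice_from_natCast]
    simp [pvMerge]
  | cons line rest ih =>
    intro out jn
    by_cases h : line = ""
    · simp only [List.foldl_cons, if_pos h]
      rw [ih (out ++ [""]) jn]
      simp [pvMerge, h]
    · by_cases hj : jn < lisb.length
      · have hcond : (jn : Int) < (lisb.length : Int) := by exact_mod_cast hj
        simp only [List.foldl_cons, if_neg h, if_pos hcond]
        have hcast : (jn : Int) + 1 = ((jn + 1 : Nat) : Int) := by push_cast; ring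
        rw [hcast, ih (out ++ [PySem.List.pyGetD lisb (jn : Int) ""]) (jn + 1)]
        rw [PySem.List.pyGetD_natCast]
        have hdrop : lisb.drop jn = lisb[jn] :: lisb.drop (jn + 1) := List.drop_eq_getElem_cons hj
        rw [hdrop]
        simp only [pvMerge, if_neg h]
        rw [List.getD_eq_getElem lisb "" hj]
        simp
      · have hcond : ¬ ((jn : Int) < (lisb.length : Int)) := by
          intro hc; exact hj (by exact_mod_cast hc)
        simp only [List.foldl_cons, if_neg h, if_neg hcond]
        rw [ih out jn]
        have hdrop : lisb.drop jn = [] := List.drop_eq_nil_iff.mpr (by omega)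
        rw [hdrop]
        simp [pvMerge, h]

theorem pvPorts_eq (lisa lisb : List String) :
    insert_blank_lines lisa lisb = insert_blank_lines_alt lisa lisb := by
  unfold insert_blank_lines insert_blank_lines_alt
  simp only []
  rw [pvBlanks_eq lisa 0 []]
  simp only [List.nil_append]
  rw [pvA_eq_merge]
  have hb := pvB_eq_merge lisb lisa [] 0
  simp only [Nat.cast_zero, List.drop_zero, List.nil_append] at hb
  rw [hb]

-- ===== VERDICT (by name: the statement is the Claim_ definition above) =====
theorem insert_blank_lines_spec : Claim_equal_insert_blank_lines := by
  intro lisa lisb _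
  unfold Spec_insert_blank_lines
  exact pvPorts_eq lisa lisb
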